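-- pv_equiv track=rewrite | github.com/niksaz/speech-ml-2019 | 2/homework/laughter_prediction/process_audio.py | predicted_to_intervals
-- ===== SOURCE A (Python) =====
-- def predicted_to_intervals(pred_classes, frame_sec):
--     """
--     Extracts target class intervals from binary predictions by frames
--
--     :param pred_classes: array-like, binary prediction for each timeframe
--     :param frame_sec: int, length of each timeframe in seconds
--     :return: array of pairs, valid target class intervals
--     """
--     intervals = []
--     i = 0
--     while i < len(pred_classes):
--         if pred_classes[i] == 0:
--             i += 1
--             continue
--         j = i + 1
--         while j < len(pred_classes) and pred_classes[j] == 0: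
--             j += 1
--         intervals.append((frame_sec*i, frame_sec*j))
--         i = j
--     return intervals
-- ===== SOURCE B (Python) =====
-- def predicted_to_intervals(pred_classes, frame_sec):
--     starts = [k for k in range(len(pred_classes)) if pred_classes[k] != 0]
--     ends = starts[1:] + [len(pred_classes)]
--     return [(frame_sec * s, frame_sec * e) for s, e in zip(starts, ends)]
-- ===== Notes on version B (the rewrite author's own statement) =====
-- stated objective: simpler
-- what changed: Replaces the nested while-loops (outer cursor plus inner zero-skipping scan) by two separate passes: collect the nonzero frame indices, then pair each with its successor (or the total length) via zip.
import Mathlib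
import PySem

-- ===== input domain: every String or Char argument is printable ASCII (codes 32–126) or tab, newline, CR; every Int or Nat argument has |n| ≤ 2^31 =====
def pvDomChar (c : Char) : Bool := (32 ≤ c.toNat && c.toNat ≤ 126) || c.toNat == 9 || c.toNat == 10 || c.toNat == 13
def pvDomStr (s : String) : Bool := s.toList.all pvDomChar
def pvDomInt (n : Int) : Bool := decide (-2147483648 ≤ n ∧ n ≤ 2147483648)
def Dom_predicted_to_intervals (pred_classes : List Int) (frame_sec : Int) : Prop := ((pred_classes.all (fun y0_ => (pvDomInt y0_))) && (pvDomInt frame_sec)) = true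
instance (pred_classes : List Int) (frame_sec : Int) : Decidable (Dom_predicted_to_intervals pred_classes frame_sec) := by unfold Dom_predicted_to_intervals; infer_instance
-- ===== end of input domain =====

-- B replaces A's nested while-loops by two passes (collect nonzero indices, then pair
-- consecutive indices) — objective: simpler decomposition; same O(n) cost.

-- ===== PORT A =====
-- inner `while j < len(pred_classes) and pred_classes[j] == 0: j += 1` loop of A;
-- the structural fuel argument is only a totality guard (fuel ≥ len - j always holds)
def pvSkipA (pred_classes : List Int) (fuel : Nat) (j : Nat) : Nat :=
  match fuel with
  | 0 => j
  | fuel + 1 =>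
    if j < pred_classes.length then
      if pred_classes.getD j 0 == 0 then pvSkipA pred_classes fuel (j+1) else j
    else j

-- outer `while i < len(pred_classes)` loop of A, with the accumulated intervals;
-- fuel is again only a totality guard
def pvLoopA (pred_classes : List Int) (frame_sec : Int) (fuel : Nat) (i : Nat)
    (acc : List (Int × Int)) : List (Int × Int) :=
  match fuel with
  | 0 => acc
  | fuel + 1 =>
    if i < pred_classes.length then
      if pred_classes.getD i 0 == 0 then pvLoopA pred_classes frame_sec fuel (i+1) acc
      else
        pvLoopA pred_classes frame_sec fuel (pvSkipA pred_classes fuel (i+1))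
          (acc ++ [(frame_sec * (i : Int), frame_sec * ((pvSkipA pred_classes fuel (i+1)) : Int))])
    else acc

def predicted_to_intervals (pred_classes : List Int) (frame_sec : Int) : List (Int × Int) :=
  pvLoopA pred_classes frame_sec pred_classes.length 0 []

-- ===== PORT B =====
def predicted_to_intervals_alt (pred_classes : List Int) (frame_sec : Int) : List (Int × Int) :=
  let starts := (List.range pred_classes.length).filter (fun k => pred_classes.getD k 0 != 0)
  let ends := starts.drop 1 ++ [pred_classes.length]
  (starts.zip ends).map (fun se => (frame_sec * (se.1 : Int), frame_sec * (se.2 : Int)))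

-- ===== PRECONDITION & SPEC =====
def Spec_predicted_to_intervals (pred_classes : List Int) (frame_sec : Int) (out : List (Int × Int)) : Prop := out = predicted_to_intervals_alt pred_classes frame_sec
instance (pred_classes : List Int) (frame_sec : Int) (out : List (Int × Int)) : Decidable (Spec_predicted_to_intervals pred_classes frame_sec out) := by unfold Spec_predicted_to_intervals; infer_instance

-- ===== CLAIM (what is proved, stated in full; the proofs are below) =====
def Claim_equal_predicted_to_intervals : Prop := ∀ (pred_classes : List Int) (frame_sec : Int), Dom_predicted_to_intervals pred_classes frame_sec → Spec_predicted_to_intervals pred_classes frame_sec (predicted_to_intervals pred_classes frame_sec)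

-- ===== LEMMAS AND PROOFS =====

-- common normal form: intervals from a list of (start) indices, closing the last one at n
def pvSpecF (f : Int) (n : Nat) : List Nat → List (Int × Int)
  | [] => []
  | [p] => [(f * (p : Int), f * (n : Int))]
  | p :: q :: rest => (f * (p : Int), f * (q : Int)) :: pvSpecF f n (q :: rest)

-- fuel-free version of the inner zero-skipping loop
def pvSkipW (pred_classes : List Int) (j : Nat) : Nat :=
  if _h : j < pred_classes.length then
    if pred_classes.getD j 0 == 0 then pvSkipW pred_classes (j+1) else j
  else j
termination_by pred_classes.length - j

-- the nonzero indices of pred_classes from position i on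
def pvIdxFrom (pred_classes : List Int) (i : Nat) : List Nat :=
  if _h : i < pred_classes.length then
    if pred_classes.getD i 0 == 0 then pvIdxFrom pred_classes (i+1)
    else i :: pvIdxFrom pred_classes (i+1)
  else []
termination_by pred_classes.length - i

theorem pvSkipA_eq (pred : List Int) (fuel j : Nat) (hf : pred.length - j ≤ fuel) :
    pvSkipA pred fuel j = pvSkipW pred j := by
  induction fuel generalizing j with
  | zero =>
      rw [pvSkipA, pvSkipW, dif_neg (by omega)]
  | succ fuel ih =>
      rw [pvSkipA, pvSkipW]
      by_cases hlt : j < pred.length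
      · rw [if_pos hlt, dif_pos hlt]
        by_cases h0 : pred.getD j 0 == 0
        · rw [if_pos h0, if_pos h0]; exact ih (j+1) (by omega)
        · rw [if_neg h0, if_neg h0]
      · rw [if_neg hlt, dif_neg hlt]

theorem pvSkipW_ge (pred : List Int) (j : Nat) : j ≤ pvSkipW pred j := by
  rw [pvSkipW]
  split
  · split
    · have := pvSkipW_ge pred (j+1); omega
    · exact Nat.le_refl j
  · exact Nat.le_refl j
termination_by pred.length - j

theorem pvSkipW_le (pred : List Int) (j : Nat) (h : j ≤ pred.length) :
    pvSkipW pred j ≤ pred.length := by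
  rw [pvSkipW]
  split
  · split
    · exact pvSkipW_le pred (j+1) (by omega)
    · exact h
  · exact h
termination_by pred.length - j

theorem pvSkipW_nz (pred : List Int) (j : Nat)
    (h : pvSkipW pred j < pred.length) : ¬ (pred.getD (pvSkipW pred j) 0 == 0) := by
  by_cases hlt : j < pred.length
  · rw [pvSkipW, dif_pos hlt] at h ⊢
    by_cases h0 : pred.getD j 0 == 0
    · rw [if_pos h0] at h ⊢; exact pvSkipW_nz pred (j+1) h
    · rw [if_neg h0] at h ⊢; exact h0
  · rw [pvSkipW, dif_neg hlt] at h; omega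
termination_by pred.length - j

theorem pvIdxFrom_skip (pred : List Int) (j : Nat) :
    pvIdxFrom pred j = pvIdxFrom pred (pvSkipW pred j) := by
  by_cases hlt : j < pred.length
  · by_cases h0 : pred.getD j 0 == 0
    · rw [pvSkipW, dif_pos hlt, if_pos h0, pvIdxFrom, dif_pos hlt, if_pos h0]
      exact pvIdxFrom_skip pred (j+1)
    · rw [pvSkipW, dif_pos hlt, if_neg h0]
  · rw [pvSkipW, dif_neg hlt]
termination_by pred.length - j

theorem pvLoopA_out (pred : List Int) (f : Int) (fuel i : Nat)
    (acc : List (Int × Int)) (h : pred.length ≤ i) : pvLoopA pred f fuel i acc = acc := by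
  cases fuel with
  | zero => rw [pvLoopA]
  | succ fuel => rw [pvLoopA, if_neg (by omega)]

theorem pvLoopA_append (pred : List Int) (f : Int) (fuel i : Nat) (acc : List (Int × Int)) :
    pvLoopA pred f fuel i acc = acc ++ pvLoopA pred f fuel i [] := by
  induction fuel generalizing i acc with
  | zero => rw [pvLoopA, pvLoopA]; simp
  | succ fuel ih =>
      rw [pvLoopA]
      conv_rhs => rw [pvLoopA]
      by_cases hlt : i < pred.length
      · rw [if_pos hlt, if_pos hlt]
        by_cases h0 : pred.getD i 0 == 0
        · rw [if_pos h0, if_pos h0]; exact ih (i+1) acc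
        · rw [if_neg h0, if_neg h0,
              ih (pvSkipA pred fuel (i+1)) (acc ++ _),
              ih (pvSkipA pred fuel (i+1)) ([] ++ _)]
          simp
      · rw [if_neg hlt, if_neg hlt]; simp

theorem pvLoopA_spec (pred : List Int) (f : Int) (fuel i : Nat)
    (hf : pred.length - i ≤ fuel) :
    pvLoopA pred f fuel i [] = pvSpecF f pred.length (pvIdxFrom pred i) := by
  induction fuel generalizing i with
  | zero =>
      rw [pvLoopA, pvIdxFrom, dif_neg (by omega)]; rfl
  | succ fuel ih =>
      rw [pvLoopA]
      by_cases hi : i < pred.length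
      · rw [if_pos hi]
        by_cases h0 : pred.getD i 0 == 0
        · rw [if_pos h0, pvIdxFrom, dif_pos hi, if_pos h0]
          exact ih (i+1) (by omega)
        · rw [if_neg h0]
          conv_rhs => rw [pvIdxFrom, dif_pos hi, if_neg h0]
          rw [pvLoopA_append, pvSkipA_eq pred fuel (i+1) (by omega),
              pvIdxFrom_skip pred (i+1)]
          by_cases hj : pvSkipW pred (i+1) < pred.length
          · have hnz := pvSkipW_nz pred (i+1) hj
            have hge := pvSkipW_ge pred (i+1)
            rw [ih (pvSkipW pred (i+1)) (by omega)]
            rw [pvIdxFrom, dif_pos hj, if_neg hnz]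
            simp [pvSpecF]
          · have hn : pvSkipW pred (i+1) = pred.length := by
              have := pvSkipW_le pred (i+1) (by omega); omega
            rw [pvLoopA_out pred f fuel _ _ (by omega), pvIdxFrom, dif_neg hj]
            simp [pvSpecF, hn]
      · rw [if_neg hi, pvIdxFrom, dif_neg hi]
        rfl

theorem pvIdxFrom_filter (pred : List Int) (i : Nat) :
    pvIdxFrom pred i
      = (List.range' i (pred.length - i)).filter (fun k => pred.getD k 0 != 0) := by
  rw [pvIdxFrom]
  split
  · rename_i hi
    have hc : pred.length - i = (pred.length - (i+1)) + 1 := by omega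
    rw [hc, List.range'_succ, List.filter_cons]
    rw [pvIdxFrom_filter pred (i+1)]
    cases h0 : (pred.getD i 0 == 0) <;> simp [List.getD] at h0 <;> simp [h0, List.getD]
  · rename_i hi
    have hc : pred.length - i = 0 := by omega
    simp [hc]
termination_by pred.length - i

theorem pvZip_spec (f : Int) (n : Nat) :
    ∀ P : List Nat,
      ((P.zip (P.drop 1 ++ [n])).map (fun se => (f * (se.1 : Int), f * (se.2 : Int))))
        = pvSpecF f n P
  | [] => rfl
  | [_] => rfl
  | p :: q :: rest => by
      have := pvZip_spec f n (q :: rest)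
      simp only [List.drop, List.cons_append, List.zip_cons_cons, List.map, pvSpecF] at this ⊢
      simpa using this

-- ===== VERDICT (by name: the statement is the Claim_ definition above) =====
theorem predicted_to_intervals_spec : Claim_equal_predicted_to_intervals := by
  intro pred f _
  show predicted_to_intervals pred f = predicted_to_intervals_alt pred f
  rw [predicted_to_intervals, predicted_to_intervals_alt]
  rw [pvLoopA_spec pred f pred.length 0 (by omega), pvIdxFrom_filter]
  simp only [Nat.sub_zero, ← List.range_eq_range']
  exact (pvZip_spec f pred.length _).symm
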